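-- pv_equiv track=rewrite | github.com/QuantLet/Encode-the-Qode | Quantlet/3-data-preprocessing/preprocessing_utils.py | tokenize_block
-- ===== SOURCE A (Python) =====
-- def check_if_import(code_snippet, language='py'):
--
--     """Check if code_snippet is part of import section"""
--     is_import = False
--
--     if language == 'py':
--         if code_snippet.startswith(('import', 'from', 'pip', '!pip')):
--             is_import = True
--     elif language == 'r':
--         if code_snippet.startswith(('library', 'install', 'source', )):
--             is_import = True
--     elif language == 'm':
--         if code_snippet.startswith(('load', 'import')):
--             is_import = True
--
--     return is_import
--
-- def check_if_part_of_block(code_snippet, language='py'):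
--
--     """Check if code_snippet is part of a block of code"""
--     is_block = False
--     if language == 'py':
--         if code_snippet.startswith(
--             (
--             ' ', '\t', ')', '}', ']', 'else', 'elif', 'except', 'finally'
--             )
--             ):
--             is_block = True
--     elif language == 'r':
--         pass
--     elif language == 'm':
--         pass
--
-- def tokenize_block(code_list):
--
--     """Tokenize a block of code"""
--
--     new_list = []
--     import_flag = False
--
--     for code_snippet in code_list:
--
--         if check_if_part_of_block(code_snippet):
--
--             new_list[-1] = new_list[-1] + code_snippet
--             continue
--         elif check_if_import(code_snippet):
--             if import_flag:
--                 new_list[-1] = new_list[-1] + code_snippet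
--             else:
--                 new_list.append(code_snippet)
--                 import_flag = True
--             continue
--         else:
--             new_list.append(code_snippet)
--             import_flag = False
--
--     return new_list
-- ===== SOURCE B (Python) =====
-- def _is_import(code_snippet):
--     return code_snippet.startswith(('import', 'from', 'pip', '!pip'))
--
-- def tokenize_block(code_list):
--     """Merge each maximal run of consecutive import snippets into one string;
--     every other snippet is kept as its own element (the block check in the
--     original is a no-op, so nothing else is merged)."""
--     out = []
--     i = 0
--     n = len(code_list)
--     while i < n:
--         if _is_import(code_list[i]):
--             j = i
--             while j < n and _is_import(code_list[j]):
--                 j += 1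
--             out.append(''.join(code_list[i:j]))
--             i = j
--         else:
--             out.append(code_list[i])
--             i += 1
--     return out
-- ===== Notes on version B (the rewrite author's own statement) =====
-- stated objective: simpler
-- what changed: Replaces the stateful fold that rewrites new_list[-1] under an import_flag (plus the dead no-op block check) with a run-grouping scan: each maximal run of consecutive import snippets is joined into one element, everything else is copied through.
import Mathlib
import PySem

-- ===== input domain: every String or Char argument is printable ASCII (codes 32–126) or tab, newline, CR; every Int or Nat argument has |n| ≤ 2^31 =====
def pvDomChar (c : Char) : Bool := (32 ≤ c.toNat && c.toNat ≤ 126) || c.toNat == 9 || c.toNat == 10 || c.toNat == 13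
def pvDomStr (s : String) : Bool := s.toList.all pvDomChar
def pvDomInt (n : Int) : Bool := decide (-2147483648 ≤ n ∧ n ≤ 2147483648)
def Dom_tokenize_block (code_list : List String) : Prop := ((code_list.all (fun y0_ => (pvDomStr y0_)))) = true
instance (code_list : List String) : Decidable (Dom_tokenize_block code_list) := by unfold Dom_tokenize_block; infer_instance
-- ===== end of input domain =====

-- B replaces A's stateful import_flag fold (with its dead block-continuation branch) by a
-- simpler run-grouping scan that joins each maximal run of consecutive imports; same cost.

-- ===== PORT A =====
-- Python's check_if_part_of_block computes is_block but falls off the end without `return`,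
-- so it returns None on every path; we port the return type as Option Bool, value none.
def check_if_part_of_block (code_snippet : String) (language : String) : Option Bool :=
  let is_block := false
  let _is_block :=
    if language == "py" then
      if PySem.Str.startswith code_snippet " " || PySem.Str.startswith code_snippet "\t" ||
         PySem.Str.startswith code_snippet ")" || PySem.Str.startswith code_snippet "}" ||
         PySem.Str.startswith code_snippet "]" || PySem.Str.startswith code_snippet "else" ||
         PySem.Str.startswith code_snippet "elif" || PySem.Str.startswith code_snippet "except" ||
         PySem.Str.startswith code_snippet "finally" then true else is_block
    else is_block
  none

def check_if_import (code_snippet : String) (language : String) : Bool :=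
  let is_import := false
  let is_import :=
    if language == "py" then
      if PySem.Str.startswith code_snippet "import" || PySem.Str.startswith code_snippet "from" ||
         PySem.Str.startswith code_snippet "pip" || PySem.Str.startswith code_snippet "!pip"
      then true else is_import
    else if language == "r" then
      if PySem.Str.startswith code_snippet "library" || PySem.Str.startswith code_snippet "install" ||
         PySem.Str.startswith code_snippet "source"
      then true else is_import
    else if language == "m" then
      if PySem.Str.startswith code_snippet "load" || PySem.Str.startswith code_snippet "import"
      then true else is_import
    else is_import
  is_import

-- loop body of A's for-loop; `new_list[-1] = new_list[-1] + code_snippet` is only reached with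
-- new_list nonempty (import_flag = true), written as dropLast ++ [getLast! ++ snippet]
def tokenize_block_step (st : List String × Bool) (code_snippet : String) : List String × Bool :=
  let new_list := st.1
  let import_flag := st.2
  if (check_if_part_of_block code_snippet "py").getD false then
    (new_list.dropLast ++ [new_list.getLast! ++ code_snippet], import_flag)
  else if check_if_import code_snippet "py" then
    if import_flag then
      (new_list.dropLast ++ [new_list.getLast! ++ code_snippet], import_flag)
    else
      (new_list ++ [code_snippet], true)
  else
    (new_list ++ [code_snippet], false)

def tokenize_block (code_list : List String) : List String :=
  (code_list.foldl tokenize_block_step ([], false)).1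

-- ===== PORT B =====
def pvIsImport (code_snippet : String) : Bool :=
  PySem.Str.startswith code_snippet "import" || PySem.Str.startswith code_snippet "from" ||
  PySem.Str.startswith code_snippet "pip" || PySem.Str.startswith code_snippet "!pip"

-- scan: an import snippet opens a run, the inner while extends it (takeWhile) and the run is
-- joined; a non-import snippet is copied through
def tokenize_block_alt : List String → List String
  | [] => []
  | s :: rest =>
    if pvIsImport s then
      PySem.Str.join "" (s :: rest.takeWhile pvIsImport) ::
        tokenize_block_alt (rest.dropWhile pvIsImport)
    else
      s :: tokenize_block_alt rest
termination_by l => l.length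
decreasing_by
  · exact Nat.lt_succ_of_le (List.length_dropWhile_le _ _)
  · simp

-- ===== PRECONDITION & SPEC =====
def Spec_tokenize_block (code_list : List String) (out : List String) : Prop := out = tokenize_block_alt code_list
instance (code_list : List String) (out : List String) : Decidable (Spec_tokenize_block code_list out) := by unfold Spec_tokenize_block; infer_instance

-- ===== CLAIM (what is proved, stated in full; the proofs are below) =====
def Claim_equal_tokenize_block : Prop := ∀ (code_list : List String), Dom_tokenize_block code_list → Spec_tokenize_block code_list (tokenize_block code_list)

-- ===== LEMMAS AND PROOFS =====

theorem check_block_none (s : String) : (check_if_part_of_block s "py").getD false = false := rfl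

theorem check_import_eq (s : String) : check_if_import s "py" = pvIsImport s := by
  simp [check_if_import, pvIsImport]

theorem join_empty_cons (a : String) (l : List String) :
    PySem.Str.join "" (a :: l) = a ++ PySem.Str.join "" l := by
  cases l with
  | nil => simp [PySem.Str.join, PySem.Chars.join, List.intercalate, String.append_empty]
  | cons b t => simp [PySem.Str.join, PySem.Chars.join_cons_cons]

theorem join_empty_nil : PySem.Str.join "" ([] : List String) = "" := rfl

theorem alt_cons_import (s : String) (rest : List String) (h : pvIsImport s = true) :
    tokenize_block_alt (s :: rest) =
      PySem.Str.join "" (s :: rest.takeWhile pvIsImport) ::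
        tokenize_block_alt (rest.dropWhile pvIsImport) := by
  rw [tokenize_block_alt]; simp [h]

theorem alt_cons_nonimport (s : String) (rest : List String) (h : pvIsImport s = false) :
    tokenize_block_alt (s :: rest) = s :: tokenize_block_alt rest := by
  rw [tokenize_block_alt]; simp [h]

-- the loop invariant of A's fold, both flag states at once
theorem fold_invar (xs : List String) :
    (∀ acc : List String,
      (xs.foldl tokenize_block_step (acc, false)).1 = acc ++ tokenize_block_alt xs) ∧
    (∀ (acc : List String) (p : String),
      (xs.foldl tokenize_block_step (acc ++ [p], true)).1 =
        acc ++ (p ++ PySem.Str.join "" (xs.takeWhile pvIsImport)) ::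
          tokenize_block_alt (xs.dropWhile pvIsImport)) := by
  induction xs with
  | nil =>
    constructor
    · intro acc; simp [tokenize_block_alt]
    · intro acc p; simp [tokenize_block_alt, join_empty_nil, String.append_empty]
  | cons s rest ih =>
    obtain ⟨ihF, ihT⟩ := ih
    constructor
    · intro acc
      by_cases h : pvIsImport s = true
      · have hstep : tokenize_block_step (acc, false) s = (acc ++ [s], true) := by
          simp [tokenize_block_step, check_block_none, check_import_eq, h]
        rw [List.foldl_cons, hstep, ihT acc s, alt_cons_import s rest h, join_empty_cons]
      · have h' : pvIsImport s = false := by simpa using h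
        have hstep : tokenize_block_step (acc, false) s = (acc ++ [s], false) := by
          simp [tokenize_block_step, check_block_none, check_import_eq, h']
        rw [List.foldl_cons, hstep, ihF (acc ++ [s]), alt_cons_nonimport s rest h']
        simp
    · intro acc p
      by_cases h : pvIsImport s = true
      · have hstep : tokenize_block_step (acc ++ [p], true) s = (acc ++ [p ++ s], true) := by
          simp [tokenize_block_step, check_block_none, check_import_eq, h]
        rw [List.foldl_cons, hstep, ihT acc (p ++ s)]
        have htw : (s :: rest).takeWhile pvIsImport = s :: rest.takeWhile pvIsImport := by
          simp [h]
        have hdw : (s :: rest).dropWhile pvIsImport = rest.dropWhile pvIsImport := by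
          simp [h]
        rw [htw, hdw, join_empty_cons, String.append_assoc]
      · have h' : pvIsImport s = false := by simpa using h
        have hstep : tokenize_block_step (acc ++ [p], true) s = ((acc ++ [p]) ++ [s], false) := by
          simp [tokenize_block_step, check_block_none, check_import_eq, h']
        have htw : (s :: rest).takeWhile pvIsImport = [] := by
          simp [h']
        have hdw : (s :: rest).dropWhile pvIsImport = s :: rest := by
          simp [h']
        rw [List.foldl_cons, hstep, ihF ((acc ++ [p]) ++ [s]), htw, hdw,
          alt_cons_nonimport s rest h', join_empty_nil, String.append_empty]
        simp

-- ===== VERDICT (by name: the statement is the Claim_ definition above) =====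
theorem tokenize_block_spec : Claim_equal_tokenize_block := by
  intro code_list _
  unfold Spec_tokenize_block tokenize_block
  simpa using (fold_invar code_list).1 []
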